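-- pv_equiv track=rewrite | github.com/clivepato93/Edabit_challenges | Python/Hard/boxes.py | boxes
-- ===== SOURCE A (Python) =====
-- def boxes(w):
--     e=1
--     x=0
--     checker=0
--     s=0
--     for i,v in enumerate(w):
--         if sum(w[s:e+1])>10:
--             checker+=1
--             s=e
--             e+=1
--         elif sum(w[s:e])<11:
--             e+=1
--         if i==len(w)-1:
--             checker+=1
--         x+=1
--     return checker
-- ===== SOURCE B (Python) =====
-- def boxes(w):
--     # One pass: the current box load is maintained incrementally, no slice re-summation.
--     n = len(w)
--     if n == 0:
--         return 0
--     checker = 0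
--     e = 1
--     cur = w[0]  # sum(w[s:e]) for the current window
--     for _ in range(n):
--         nxt = cur + (w[e] if e < n else 0)
--         if nxt > 10:
--             checker += 1
--             cur = w[e] if e < n else 0
--             e += 1
--         elif cur < 11:
--             cur = nxt
--             e += 1
--     return checker + 1
-- ===== Notes on version B (the rewrite author's own statement) =====
-- stated objective: faster
-- what changed: B maintains the current window sum incrementally in a single pass instead of re-summing the slices w[s:e] and w[s:e+1] on every iteration.
import Mathlib
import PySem

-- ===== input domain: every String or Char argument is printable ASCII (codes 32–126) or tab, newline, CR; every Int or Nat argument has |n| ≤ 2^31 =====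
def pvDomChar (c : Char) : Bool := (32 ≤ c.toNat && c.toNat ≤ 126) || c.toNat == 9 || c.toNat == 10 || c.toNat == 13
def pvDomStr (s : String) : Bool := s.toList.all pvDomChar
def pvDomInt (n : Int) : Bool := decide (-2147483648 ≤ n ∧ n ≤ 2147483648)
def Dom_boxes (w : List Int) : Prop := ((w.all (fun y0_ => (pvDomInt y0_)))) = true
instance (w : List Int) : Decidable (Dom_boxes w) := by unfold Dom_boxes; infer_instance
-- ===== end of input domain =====

-- B replaces A's per-iteration slice re-summation by an incrementally maintained window sum (one pass, O(n) vs O(n^2)).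

-- ===== PORT A =====
-- loop body of A: state (e, x, checker, s), element (i, v) from enumerate(w)
def boxesStepA (w : List Int) (n : Int) (st : Int × Int × Int × Int) (iv : Int × Int) : Int × Int × Int × Int :=
  let e := st.1; let x := st.2.1; let checker := st.2.2.1; let s := st.2.2.2
  let (e, checker, s) :=
    if (PySem.List.slice w (some s) (some (e + 1))).sum > 10 then (e + 1, checker + 1, e)
    else if (PySem.List.slice w (some s) (some e)).sum < 11 then (e + 1, checker, s)
    else (e, checker, s)
  let checker := if iv.1 = n - 1 then checker + 1 else checker
  (e, x + 1, checker, s)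

def boxes (w : List Int) : Int :=
  ((PySem.List.enumerate w 0).foldl (boxesStepA w (w.length : Int)) (1, 0, 0, 0)).2.2.1

-- ===== PORT B =====
-- loop body of B: state (checker, e, cur); the range element is ignored (Python's `for _ in range(n)`)
def boxesStepB (w : List Int) (n : Int) (st : Int × Int × Int) (_i : Int) : Int × Int × Int :=
  let checker := st.1; let e := st.2.1; let cur := st.2.2
  let nxt := cur + (if e < n then PySem.List.pyGetD w e 0 else 0)
  if nxt > 10 then (checker + 1, e + 1, if e < n then PySem.List.pyGetD w e 0 else 0)
  else if cur < 11 then (checker, e + 1, nxt)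
  else (checker, e, cur)

def boxes_alt (w : List Int) : Int :=
  if (w.length : Int) = 0 then 0
  else ((PySem.List.pyRange 0 (w.length : Int) 1).foldl (boxesStepB w (w.length : Int))
        (0, 1, PySem.List.pyGetD w 0 0)).1 + 1
  -- pyGetD w 0 0 ports Python's w[0], exact here since the branch guarantees w ≠ []

-- ===== PRECONDITION & SPEC =====
def Spec_boxes (w : List Int) (out : Int) : Prop := out = boxes_alt w
instance (w : List Int) (out : Int) : Decidable (Spec_boxes w out) := by unfold Spec_boxes; infer_instance

-- ===== CLAIM (what is proved, stated in full; the proofs are below) =====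
def Claim_equal_boxes : Prop := ∀ (w : List Int), Dom_boxes w → Spec_boxes w (boxes w)

-- ===== LEMMAS AND PROOFS =====

lemma sum_take_succ (l : List Int) (k : Nat) :
    (l.take (k + 1)).sum = (l.take k).sum + l[k]?.getD 0 := by
  rw [List.take_add_one, List.sum_append]
  cases h : l[k]? <;> simp [Option.toList]

lemma sum_take_drop (w : List Int) (sN eN : Nat) (h : sN ≤ eN) :
    ((w.drop sN).take (eN + 1 - sN)).sum
      = ((w.drop sN).take (eN - sN)).sum + w[eN]?.getD 0 := by
  have h1 : eN + 1 - sN = (eN - sN) + 1 := by omega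
  have h2 : sN + (eN - sN) = eN := by omega
  rw [h1, sum_take_succ, List.getElem?_drop, h2]

lemma boxes_main (w : List Int) : ∀ (k : Nat), k ≤ w.length →
    ∃ (eN sN : Nat) (x ch cur : Int),
      (PySem.List.pyRange 0 (k : Int) 1).foldl
          (fun st j => boxesStepA w (w.length : Int) st (j, PySem.List.pyGetD w j 0)) (1, 0, 0, 0)
        = ((eN : Int), x, ch + (if k = w.length ∧ 1 ≤ w.length then 1 else 0), (sN : Int)) ∧
      (PySem.List.pyRange 0 (k : Int) 1).foldl (boxesStepB w (w.length : Int))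
          (0, 1, PySem.List.pyGetD w 0 0)
        = (ch, (eN : Int), cur) ∧
      sN ≤ eN ∧ 1 ≤ eN ∧ cur = ((w.drop sN).take (eN - sN)).sum := by
  intro k
  induction k with
  | zero =>
    intro _
    refine ⟨1, 0, 0, 0, PySem.List.pyGetD w 0 0, ?_, ?_, by omega, by omega, ?_⟩
    · rw [PySem.List.pyRange_one_eq_nil (by omega),
         if_neg (by omega : ¬ ((0:Nat) = w.length ∧ 1 ≤ w.length))]
      simp
    · rw [PySem.List.pyRange_one_eq_nil (by omega)]
      simp
    · rw [PySem.List.pyGetD_zero]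
      cases w <;> simp
  | succ k ih =>
    intro hk1
    obtain ⟨eN, sN, x, ch, cur, hA, hB, hse, he1, hcur⟩ := ih (by omega)
    have hkn : k < w.length := by omega
    rw [if_neg (by omega : ¬ (k = w.length ∧ 1 ≤ w.length))] at hA
    have hsplit : PySem.List.pyRange 0 ((k + 1 : Nat) : Int) 1
        = PySem.List.pyRange 0 (k : Int) 1 ++ [(k : Int)] := by
      push_cast
      exact PySem.List.pyRange_one_succ_right (by omega)
    -- the value appended to the window in this step
    set g : Int := w[eN]?.getD 0 with hg
    have hgif : (if (eN : Int) < (w.length : Int) then PySem.List.pyGetD w (eN : Int) 0 else 0) = g := by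
      rw [PySem.List.pyGetD_natCast, hg]
      by_cases hlt : eN < w.length
      · rw [if_pos (by exact_mod_cast hlt)]
        simp [List.getD_eq_getElem?_getD]
      · rw [if_neg (by exact_mod_cast hlt)]
        simp [List.getElem?_eq_none (by omega : w.length ≤ eN)]
    have hslice1 : (PySem.List.slice w (some (sN : Int)) (some ((eN : Int) + 1))).sum = cur + g := by
      have : ((eN : Int) + 1) = (((eN + 1 : Nat)) : Int) := by push_cast; ring
      rw [this, PySem.List.slice_natCast, hcur, hg, sum_take_drop w sN eN hse]
    have hslice2 : (PySem.List.slice w (some (sN : Int)) (some (eN : Int))).sum = cur := by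
      rw [PySem.List.slice_natCast, hcur]
    have hlast : ((k : Int) = (w.length : Int) - 1) ↔ (k + 1 = w.length) := by
      constructor <;> intro h <;> omega
    have hdrop1 : ∀ m : Nat, ((w.drop m).take (m + 1 - m)).sum = w[m]?.getD 0 := by
      intro m
      have : m + 1 - m = 1 := by omega
      rw [this]
      rw [(by omega : (1 : Nat) = 0 + 1), sum_take_succ, List.getElem?_drop]
      simp
    rw [hsplit]
    by_cases c1 : cur + g > 10
    · -- box closed: s := e, e := e + 1, checker += 1
      refine ⟨eN + 1, eN, x + 1, ch + 1, g, ?_, ?_, by omega, by omega, ?_⟩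
      · rw [List.foldl_append, hA]
        simp only [List.foldl_cons, List.foldl_nil, boxesStepA]
        rw [hslice1, if_pos c1]
        simp only
        push_cast
        by_cases hl : k + 1 = w.length
        · rw [if_pos (hlast.mpr hl), if_pos ⟨hl, by omega⟩]
          simp only [add_zero]
        · rw [if_neg (fun h => hl (hlast.mp h)), if_neg (by omega : ¬ (k + 1 = w.length ∧ 1 ≤ w.length))]
          simp only [add_zero]
      · rw [List.foldl_append, hB]
        simp only [List.foldl_cons, List.foldl_nil, boxesStepB]
        rw [hgif, if_pos c1]
        push_cast
        rfl
      · rw [hg, ← hdrop1 eN]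
    · by_cases c2 : cur < 11
      · -- extend window: e := e + 1
        refine ⟨eN + 1, sN, x + 1, ch, cur + g, ?_, ?_, by omega, by omega, ?_⟩
        · rw [List.foldl_append, hA]
          simp only [List.foldl_cons, List.foldl_nil, boxesStepA]
          rw [hslice1, if_neg c1, hslice2, if_pos c2]
          simp only
          push_cast
          by_cases hl : k + 1 = w.length
          · rw [if_pos (hlast.mpr hl), if_pos ⟨hl, by omega⟩]
            simp only [add_zero]
          · rw [if_neg (fun h => hl (hlast.mp h)), if_neg (by omega : ¬ (k + 1 = w.length ∧ 1 ≤ w.length))]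
        · rw [List.foldl_append, hB]
          simp only [List.foldl_cons, List.foldl_nil, boxesStepB]
          rw [hgif, if_neg c1, if_pos c2]
          push_cast
          exact rfl
        · rw [hcur, hg, sum_take_drop w sN eN hse]
      · -- stall: state unchanged
        refine ⟨eN, sN, x + 1, ch, cur, ?_, ?_, hse, he1, hcur⟩
        · rw [List.foldl_append, hA]
          simp only [List.foldl_cons, List.foldl_nil, boxesStepA]
          rw [hslice1, if_neg c1, hslice2, if_neg c2]
          simp only
          by_cases hl : k + 1 = w.length
          · rw [if_pos (hlast.mpr hl), if_pos ⟨hl, by omega⟩]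
            simp only [add_zero]
          · rw [if_neg (fun h => hl (hlast.mp h)), if_neg (by omega : ¬ (k + 1 = w.length ∧ 1 ≤ w.length))]
        · rw [List.foldl_append, hB]
          simp only [List.foldl_cons, List.foldl_nil, boxesStepB]
          rw [hgif, if_neg c1, if_neg c2]

-- ===== VERDICT (by name: the statement is the Claim_ definition above) =====
theorem boxes_spec : Claim_equal_boxes := by
  intro w _
  unfold Spec_boxes boxes boxes_alt
  rw [PySem.List.enumerate_eq_map_pyRange w 0, List.foldl_map]
  simp only [PySem.List.len]
  obtain ⟨eN, sN, x, ch, cur, hA, hB, _, _, _⟩ := boxes_main w w.length le_rfl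
  by_cases h0 : w.length = 0
  · have h0' : (w.length : Int) = 0 := by exact_mod_cast h0
    rw [if_pos h0', h0', PySem.List.pyRange_one_eq_nil (le_refl 0)]
    simp
  · have h0' : ¬ (w.length : Int) = 0 := by exact_mod_cast h0
    rw [if_pos ⟨rfl, by omega⟩] at hA
    rw [if_neg h0', hA, hB]
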